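-- pv_equiv track=rewrite | github.com/LachlanAndrew/pubmed_typos | word_models/ask_wikipedia.py | has_English_suffix
-- ===== SOURCE A (Python) =====
-- def has_English_suffix (word) :
--   suffixes = {
--     3: ("oid", "ist", "ism", "age", "box", "ers", "ors", "ing", "tor", "ent",
--         "ies", "ium", "ial", "ise", "ize", "ied", "all"),
--     4: ("oids", "tize", "tise", "ment", "ance", "ence", "hood", "iece", "ship",
--         "gram", "head", "line", "book", "room", "ette", "less", "some", "iest",
--         "life", "bank", "tors", "ised", "ized", "ises", "izes", "ists", "ions",
--         "ings", "long", "town", "icle", "enty", "neck", "ials", "side", "ally",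
--         "ness", "tude"),
--     5: ("ation", "ative", "graph", "ioned", "ional", "genic", "nymic", "iancy",
--         "entlyl", "ively", "ingly", "antly", "ously", "edly", "ately", "ishly",
--         "lessly", "fully", "somely", "larly", "istic", "boxes", "holic",
--         "flora", "ments", "books", "lines", "heads", "rooms", "grams", "hoods",
--         "ships", "icles", "ments", "ettes", "cracy", "aways"),
--     6: ("graphy", "eaded", "mental", "ionist", "ionism", "holics", "nesses")
--   }
--
--   for k in suffixes :
--     if len (word) > k + 3 :
--       if word[-k:] in suffixes[k] :
--         return True
--
--   return False
-- ===== SOURCE B (Python) =====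
-- # Flat scan over the reachable suffixes with endswith, instead of nested
-- # length-group iteration with slicing (dead wrong-length entries dropped).
-- _SUFFIXES = (
--     "oid", "ist", "ism", "age", "box", "ers", "ors", "ing", "tor", "ent",
--     "ies", "ium", "ial", "ise", "ize", "ied", "all",
--     "oids", "tize", "tise", "ment", "ance", "ence", "hood", "iece", "ship",
--     "gram", "head", "line", "book", "room", "ette", "less", "some", "iest",
--     "life", "bank", "tors", "ised", "ized", "ises", "izes", "ists", "ions",
--     "ings", "long", "town", "icle", "enty", "neck", "ials", "side", "ally",
--     "ness", "tude",
--     "ation", "ative", "graph", "ioned", "ional", "genic", "nymic", "iancy",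
--     "ively", "ingly", "antly", "ously", "ately", "ishly", "fully", "larly",
--     "istic", "boxes", "holic", "flora", "ments", "books", "lines", "heads",
--     "rooms", "grams", "hoods", "ships", "icles", "ettes", "cracy", "aways",
--     "graphy", "mental", "ionist", "ionism", "holics", "nesses",
-- )
--
-- def has_English_suffix(word):
--     for s in _SUFFIXES:
--         if len(word) > len(s) + 3 and word.endswith(s):
--             return True
--     return False
-- ===== Notes on version B (the rewrite author's own statement) =====
-- stated objective: simpler
-- what changed: Replaces the nested length-grouped dict iteration with fixed-width slicing and tuple membership by a single flat scan over the individual reachable suffixes using endswith (the group entries whose length differs from their group key, which the fixed slice can never equal, are dropped).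
import Mathlib
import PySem

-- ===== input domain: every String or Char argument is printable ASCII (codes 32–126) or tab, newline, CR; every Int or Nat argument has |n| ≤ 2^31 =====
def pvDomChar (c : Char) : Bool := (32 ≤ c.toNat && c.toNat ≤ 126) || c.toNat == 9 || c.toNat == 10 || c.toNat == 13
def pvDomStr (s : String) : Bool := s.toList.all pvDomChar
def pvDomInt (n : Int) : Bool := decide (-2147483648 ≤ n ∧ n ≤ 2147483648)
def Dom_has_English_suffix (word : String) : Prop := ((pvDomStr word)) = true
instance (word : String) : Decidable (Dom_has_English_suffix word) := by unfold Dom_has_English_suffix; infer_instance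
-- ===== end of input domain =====

-- B replaces A's length-grouped dict with fixed-width slicing by one flat scan of the
-- reachable suffixes using endswith (same return value on every input; objective: simpler).

-- ===== PORT A =====
def pvGroup3 : List String :=
  ["oid", "ist", "ism", "age", "box", "ers", "ors", "ing", "tor", "ent", "ies", "ium", "ial", "ise", "ize", "ied", "all"]

def pvGroup4 : List String :=
  ["oids", "tize", "tise", "ment", "ance", "ence", "hood", "iece", "ship", "gram", "head", "line", "book", "room", "ette", "less", "some", "iest", "life", "bank", "tors", "ised", "ized", "ises", "izes", "ists", "ions", "ings", "long", "town", "icle", "enty", "neck", "ials", "side", "ally", "ness", "tude"]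

def pvGroup5 : List String :=
  ["ation", "ative", "graph", "ioned", "ional", "genic", "nymic", "iancy", "entlyl", "ively", "ingly", "antly", "ously", "edly", "ately", "ishly", "lessly", "fully", "somely", "larly", "istic", "boxes", "holic", "flora", "ments", "books", "lines", "heads", "rooms", "grams", "hoods", "ships", "icles", "ments", "ettes", "cracy", "aways"]

def pvGroup6 : List String :=
  ["graphy", "eaded", "mental", "ionist", "ionism", "holics", "nesses"]

def pvSuffixDict : List (Int × List String) :=
  [(3, pvGroup3), (4, pvGroup4), (5, pvGroup5), (6, pvGroup6)]

-- 'for k in suffixes: if len(word) > k + 3: if word[-k:] in suffixes[k]: return True' ; 'return False'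
def pvALoop (word : String) : List (Int × List String) → Bool
  | [] => false
  | (k, tup) :: rest =>
    if PySem.Str.len word > k + 3 then
      if PySem.Str.slice word (some (-k)) none ∈ tup then true
      else pvALoop word rest
    else pvALoop word rest

def has_English_suffix (word : String) : Bool := pvALoop word pvSuffixDict

-- ===== PORT B =====
-- the flat tuple of reachable suffixes (A's wrong-length group entries dropped)
def pvSuffixes : List String :=
  ["oid", "ist", "ism", "age", "box", "ers", "ors", "ing", "tor", "ent", "ies", "ium", "ial", "ise", "ize", "ied", "all", "oids", "tize", "tise", "ment", "ance", "ence", "hood", "iece", "ship", "gram", "head", "line", "book", "room", "ette", "less", "some", "iest", "life", "bank", "tors", "ised", "ized", "ises", "izes", "ists", "ions", "ings", "long", "town", "icle", "enty", "neck", "ials", "side", "ally", "ness", "tude", "ation", "ative", "graph", "ioned", "ional", "genic", "nymic", "iancy", "ively", "ingly", "antly", "ously", "ately", "ishly", "fully", "larly", "istic", "boxes", "holic", "flora", "ments", "books", "lines", "heads", "rooms", "grams", "hoods", "ships", "icles", "ments", "ettes", "cracy", "aways", "graphy", "mental", "ionist", "ionism", "holics", "nesses"]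

-- 'for s in _SUFFIXES: if len(word) > len(s) + 3 and word.endswith(s): return True' ; 'return False'
def has_English_suffix_alt (word : String) : Bool :=
  pvSuffixes.any (fun s => decide (PySem.Str.len word > PySem.Str.len s + 3) && PySem.Str.endswith word s)

-- ===== PRECONDITION & SPEC =====
def Spec_has_English_suffix (word : String) (out : Bool) : Prop := out = has_English_suffix_alt word
instance (word : String) (out : Bool) : Decidable (Spec_has_English_suffix word out) := by unfold Spec_has_English_suffix; infer_instance

-- ===== CLAIM (what is proved, stated in full; the proofs are below) =====
def Claim_equal_has_English_suffix : Prop := ∀ (word : String), Dom_has_English_suffix word → Spec_has_English_suffix word (has_English_suffix word)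

-- ===== LEMMAS AND PROOFS =====

-- A's early-return loop is an 'any' over the dict entries
lemma pvALoop_eq_any (word : String) (l : List (Int × List String)) :
    pvALoop word l = l.any (fun p =>
      decide (PySem.Str.len word > p.1 + 3) &&
      decide (PySem.Str.slice word (some (-p.1)) none ∈ p.2)) := by
  induction l with
  | nil => rfl
  | cons h t ih =>
    obtain ⟨k, tup⟩ := h
    by_cases hc : PySem.Str.len word > k + 3 <;>
      by_cases hm : PySem.Str.slice word (some (-k)) none ∈ tup <;>
      simp [pvALoop, hm, ih]

-- for a suffix of the group's length, A's slice-equality test is B's endswith test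
lemma slice_eq_iff_endswith (w s : String) (k : Nat) (hk : 0 < k)
    (hs : s.toList.length = k) (_hw : k ≤ w.toList.length) :
    PySem.Str.slice w (some (-(k : Int))) none = s ↔ PySem.Str.endswith w s = true := by
  have hlist : (PySem.Str.slice w (some (-(k : Int))) none).toList
      = w.toList.drop (w.toList.length - k) := by
    rw [PySem.Str.toList_slice, PySem.Chars.slice_eq_listSlice,
        PySem.List.slice_from_neg_natCast _ k hk]
  rw [← String.toList_inj, hlist, PySem.Str.endswith_eq, PySem.Chars.endswith_iff,
      List.suffix_iff_eq_drop, hs]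
  exact ⟨fun h => h.symm, fun h => h.symm⟩

-- one group of A equals B's scan of that group's reachable suffixes
lemma group_eq (w : String) (k : Nat) (hk : 0 < k) (tup : List String) :
    (decide (PySem.Str.len w > (k : Int) + 3) &&
      decide (PySem.Str.slice w (some (-(k : Int))) none ∈ tup))
    = (tup.filter (fun s => s.length == k)).any
        (fun s => decide (PySem.Str.len w > PySem.Str.len s + 3) && PySem.Str.endswith w s) := by
  by_cases hc : PySem.Str.len w > (k : Int) + 3
  · have hw : k ≤ w.toList.length := by
      rw [PySem.Str.len_eq] at hc; omega
    induction tup with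
    | nil => simp
    | cons s t ih =>
      by_cases hlen : s.length = k
      · have hkl : s.toList.length = k := by simpa using hlen
        have hks : PySem.Str.len s = (k : Int) := by rw [PySem.Str.len_eq, hkl]
        have hcs : PySem.Str.len w > PySem.Str.len s + 3 := by rw [hks]; exact hc
        have hfc : (s :: t).filter (fun x => x.length == k)
            = s :: t.filter (fun x => x.length == k) := by
          simp [hlen]
        by_cases hm : PySem.Str.slice w (some (-(k : Int))) none = s
        · have l1 : decide (PySem.Str.slice w (some (-(k : Int))) none ∈ s :: t) = true :=
            decide_eq_true (List.mem_cons.mpr (Or.inl hm))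
          have het : PySem.Str.endswith w s = true :=
            (slice_eq_iff_endswith w s k hk hkl hw).mp hm
          rw [hfc, List.any_cons, l1, decide_eq_true hc, decide_eq_true hcs, het]
          simp
        · have l1 : decide (PySem.Str.slice w (some (-(k : Int))) none ∈ s :: t)
              = decide (PySem.Str.slice w (some (-(k : Int))) none ∈ t) :=
            decide_eq_decide.mpr ⟨fun h => (List.mem_cons.mp h).resolve_left hm,
              fun h => List.mem_cons.mpr (Or.inr h)⟩
          have hef : PySem.Str.endswith w s = false := by
            cases h' : PySem.Str.endswith w s
            · rfl
            · exact absurd ((slice_eq_iff_endswith w s k hk hkl hw).mpr h') hm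
          rw [hfc, List.any_cons, l1, ih, hef]
          simp
      · have hsl : (PySem.Str.slice w (some (-(k : Int))) none).toList.length = k := by
          rw [PySem.Str.toList_slice, PySem.Chars.slice_eq_listSlice,
              PySem.List.slice_from_neg_natCast _ k hk, List.length_drop]
          omega
        have hne : PySem.Str.slice w (some (-(k : Int))) none ≠ s := by
          intro h
          exact hlen (by simpa using (h ▸ hsl))
        have hfc : (s :: t).filter (fun x => x.length == k)
            = t.filter (fun x => x.length == k) := by
          simp [hlen]
        have l1 : decide (PySem.Str.slice w (some (-(k : Int))) none ∈ s :: t)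
            = decide (PySem.Str.slice w (some (-(k : Int))) none ∈ t) :=
          decide_eq_decide.mpr ⟨fun h => (List.mem_cons.mp h).resolve_left hne,
            fun h => List.mem_cons.mpr (Or.inr h)⟩
        rw [hfc, l1, ih]
  · have h1 : decide (PySem.Str.len w > (k : Int) + 3) = false := decide_eq_false hc
    rw [h1, Bool.false_and]
    symm
    rw [List.any_eq_false]
    intro s hsmem
    have hlen : s.length = k := by simpa using (List.mem_filter.mp hsmem).2
    have hkl : s.toList.length = k := by simpa using hlen
    have hks : PySem.Str.len s = (k : Int) := by rw [PySem.Str.len_eq, hkl]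
    simp only [Bool.and_eq_true, decide_eq_true_eq, not_and]
    intro hgt _
    exact absurd (hks ▸ hgt) hc

-- B's flat tuple is exactly the concatenation of the length-filtered groups
lemma suffixes_split : pvSuffixes
    = pvGroup3.filter (fun s => s.length == 3)
      ++ pvGroup4.filter (fun s => s.length == 4)
      ++ pvGroup5.filter (fun s => s.length == 5)
      ++ pvGroup6.filter (fun s => s.length == 6) := by
  decide

-- ===== VERDICT (by name: the statement is the Claim_ definition above) =====
theorem has_English_suffix_spec : Claim_equal_has_English_suffix := by
  intro word _
  unfold Spec_has_English_suffix
  have g3 := group_eq word 3 (by norm_num) pvGroup3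
  have g4 := group_eq word 4 (by norm_num) pvGroup4
  have g5 := group_eq word 5 (by norm_num) pvGroup5
  have g6 := group_eq word 6 (by norm_num) pvGroup6
  simp only [Nat.cast_ofNat] at g3 g4 g5 g6
  rw [has_English_suffix, pvALoop_eq_any]
  simp only [pvSuffixDict, List.any_cons, List.any_nil]
  rw [g3, g4, g5, g6, has_English_suffix_alt, suffixes_split]
  simp [List.any_append]
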